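-- pv_equiv track=rewrite | github.com/Yihanhu/Algorithms_stanford | Divide_and_conquer(Course1)/week123/2_3.py | sorted_pair_search
-- ===== SOURCE A (Python) =====
-- def sorted_pair_search(lst):
--     n = len(lst)
--     if n == 1:
--         return 0
--     if lst[int(n/2)]>int(n/2):
--         return sorted_pair_search(lst[:int(n/2)])
--     if lst[int(n/2)]<int(n/2):
--         return sorted_pair_search(lst[int(n/2)+1:])
--     else:
--         return 1
-- ===== SOURCE B (Python) =====
-- def sorted_pair_search(lst):
--     lo, hi = 0, len(lst)
--     while hi - lo > 1:
--         m = (hi - lo) // 2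
--         v = lst[lo + m]
--         if v > m:
--             hi = lo + m
--         elif v < m:
--             lo = lo + m + 1
--         else:
--             return 1
--     return 0
-- ===== Notes on version B (the rewrite author's own statement) =====
-- stated objective: alternative
-- what changed: A's recursion that builds a fresh slice copy at every level is replaced by an iterative two-pointer bisection on (lo, hi) over the original list, so no sublists are materialised; B returns 0 where A raises IndexError on an empty segment.
import Mathlib
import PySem

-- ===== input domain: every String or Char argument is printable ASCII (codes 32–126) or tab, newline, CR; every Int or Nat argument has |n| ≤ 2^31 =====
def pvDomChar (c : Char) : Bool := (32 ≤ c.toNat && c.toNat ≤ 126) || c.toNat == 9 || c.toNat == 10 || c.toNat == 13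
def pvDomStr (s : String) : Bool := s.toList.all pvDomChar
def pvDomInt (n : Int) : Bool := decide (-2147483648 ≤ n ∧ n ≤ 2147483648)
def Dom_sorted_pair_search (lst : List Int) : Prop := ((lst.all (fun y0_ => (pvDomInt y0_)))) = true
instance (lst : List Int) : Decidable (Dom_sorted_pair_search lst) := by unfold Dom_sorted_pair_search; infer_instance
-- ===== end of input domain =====

-- B replaces A's recursion-with-slicing by an iterative two-pointer bisection on (lo, hi)
-- over the original list (no copies); where A raises IndexError on an empty segment, B returns 0.

-- ===== PORT A =====
-- fuel = recursion-depth bound; every recursive call strictly shortens the list, so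
-- fuel = lst.length + 1 (set by the wrapper) is never exhausted.
def sortedPairSearchGo : Nat → List Int → Int
  | 0, _ => 0
  | fuel + 1, lst =>
    let n : Int := lst.length
    if n = 1 then 0
    else
      match PySem.List.pyGet? lst (n / 2) with
      | none => 0  -- Python raises IndexError here (only for lst = []); excluded by Pre_
      | some v =>
        if v > n / 2 then
          sortedPairSearchGo fuel (PySem.List.slice lst none (some (n / 2)))
        else if v < n / 2 then
          sortedPairSearchGo fuel (PySem.List.slice lst (some (n / 2 + 1)) none)
        else 1

def sorted_pair_search (lst : List Int) : Int := sortedPairSearchGo (lst.length + 1) lst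

-- ===== PORT B =====
-- fuel = loop-iteration bound; hi - lo strictly decreases each iteration, so
-- fuel = lst.length + 1 (set by the wrapper) is never exhausted.
def sortedPairSearchLoop (lst : List Int) : Nat → Nat → Nat → Int
  | 0, _, _ => 0
  | fuel + 1, lo, hi =>
    if hi - lo > 1 then
      let m := (hi - lo) / 2
      let v := lst.getD (lo + m) 0  -- lo + m < hi ≤ lst.length at every call from the wrapper
      if v > (m : Int) then sortedPairSearchLoop lst fuel lo (lo + m)
      else if v < (m : Int) then sortedPairSearchLoop lst fuel (lo + m + 1) hi
      else 1
    else 0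

def sorted_pair_search_alt (lst : List Int) : Int :=
  sortedPairSearchLoop lst (lst.length + 1) 0 lst.length

-- ===== PRECONDITION & SPEC =====
-- A raises IndexError exactly when its bisection reaches an empty segment (e.g. [] or [5,0]).
-- Which segments are visited depends on the values met along the way, so A's normal-return
-- domain has no path-free closed form (e.g. A returns on [0,5] but raises on [5,0]); pvSafeGo
-- states exactly that condition: the walk over index intervals (lo,hi) never reaches an empty
-- one.  It computes no output of either program, and Pre_ excludes NO input on which A returns.
def pvSafeGo (lst : List Int) : Nat → Nat → Nat → Bool
  | 0, _, _ => false
  | fuel + 1, lo, hi =>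
    if hi - lo = 0 then false
    else if hi - lo = 1 then true
    else
      let m := (hi - lo) / 2
      let v := lst.getD (lo + m) 0
      if v > (m : Int) then pvSafeGo lst fuel lo (lo + m)
      else if v < (m : Int) then pvSafeGo lst fuel (lo + m + 1) hi
      else true

def Pre_sorted_pair_search (lst : List Int) : Prop :=
  pvSafeGo lst (lst.length + 1) 0 lst.length = true
instance (lst : List Int) : Decidable (Pre_sorted_pair_search lst) := by
  unfold Pre_sorted_pair_search; infer_instance

def pvWitness_sorted_pair_search : List Int := [0, 1]

def Spec_sorted_pair_search (lst : List Int) (out : Int) : Prop := out = sorted_pair_search_alt lst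
instance (lst : List Int) (out : Int) : Decidable (Spec_sorted_pair_search lst out) := by
  unfold Spec_sorted_pair_search; infer_instance

-- ===== CLAIM (what is proved, stated in full; the proofs are below) =====
def Claim_equal_sorted_pair_search : Prop :=
  ∀ (lst : List Int), Dom_sorted_pair_search lst → Pre_sorted_pair_search lst →
    Spec_sorted_pair_search lst (sorted_pair_search lst)

-- ===== LEMMAS AND PROOFS =====

lemma pv_loop_succ (lst : List Int) (f lo hi : Nat) :
    sortedPairSearchLoop lst (f + 1) lo hi =
      if hi - lo > 1 then
        (if lst.getD (lo + (hi - lo) / 2) 0 > (((hi - lo) / 2 : Nat) : Int) then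
          sortedPairSearchLoop lst f lo (lo + (hi - lo) / 2)
        else if lst.getD (lo + (hi - lo) / 2) 0 < (((hi - lo) / 2 : Nat) : Int) then
          sortedPairSearchLoop lst f (lo + (hi - lo) / 2 + 1) hi
        else 1)
      else 0 := rfl

lemma pv_safe_succ (lst : List Int) (f lo hi : Nat) :
    pvSafeGo lst (f + 1) lo hi =
      if hi - lo = 0 then false
      else if hi - lo = 1 then true
      else if lst.getD (lo + (hi - lo) / 2) 0 > (((hi - lo) / 2 : Nat) : Int) then
        pvSafeGo lst f lo (lo + (hi - lo) / 2)
      else if lst.getD (lo + (hi - lo) / 2) 0 < (((hi - lo) / 2 : Nat) : Int) then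
        pvSafeGo lst f (lo + (hi - lo) / 2 + 1) hi
      else true := rfl

lemma pv_goA_succ_some (f : Nat) (lst : List Int) (v : Int)
    (hn : ¬ ((lst.length : Int) = 1))
    (h : PySem.List.pyGet? lst ((lst.length : Int) / 2) = some v) :
    sortedPairSearchGo (f + 1) lst =
      if v > (lst.length : Int) / 2 then
        sortedPairSearchGo f (PySem.List.slice lst none (some ((lst.length : Int) / 2)))
      else if v < (lst.length : Int) / 2 then
        sortedPairSearchGo f (PySem.List.slice lst (some ((lst.length : Int) / 2 + 1)) none)
      else 1 := by
  conv_lhs => rw [sortedPairSearchGo.eq_def]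
  simp only [if_neg hn, h]

lemma pv_main (lst : List Int) :
    ∀ (f lo hi : Nat), hi ≤ lst.length → hi - lo ≤ f →
      pvSafeGo lst (f + 1) lo hi = true →
      sortedPairSearchGo (f + 1) ((lst.drop lo).take (hi - lo)) =
        sortedPairSearchLoop lst (f + 1) lo hi := by
  intro f
  induction f with
  | zero =>
    intro lo hi hlen hle hsafe
    have h0 : hi - lo = 0 := by omega
    simp [pvSafeGo, h0] at hsafe
  | succ f ih =>
    intro lo hi hlen hle hsafe
    by_cases h0 : hi - lo = 0
    · simp [pvSafeGo, h0] at hsafe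
    by_cases h1 : hi - lo = 1
    · -- segment of length 1: A returns 0 (n == 1), B's loop guard fails
      have hseg : ((lst.drop lo).take (hi - lo)).length = 1 := by
        simp [List.length_take, List.length_drop]; omega
      have hseg1 : (((lst.drop lo).take (hi - lo)).length : Int) = 1 := by
        rw [hseg]; rfl
      rw [pv_loop_succ, if_neg (show ¬ hi - lo > 1 by omega)]
      conv_lhs => rw [sortedPairSearchGo.eq_def]
      simp only [hseg1, if_true]
    · -- segment of length ≥ 2
      obtain ⟨m, hm⟩ : ∃ x, (hi - lo) / 2 = x := ⟨_, rfl⟩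
      have hmlt : m < hi - lo := by omega
      have hm1 : 1 ≤ m := by omega
      have hseglen : ((lst.drop lo).take (hi - lo)).length = hi - lo := by
        simp [List.length_take, List.length_drop]; omega
      have hidx : lo + m < lst.length := by omega
      have hget : ((lst.drop lo).take (hi - lo))[m]'(by omega) = lst[lo + m]'hidx := by
        rw [List.getElem_take, List.getElem_drop]
      have hgetD : lst.getD (lo + m) 0 = lst[lo + m]'hidx := List.getD_eq_getElem lst 0 hidx
      have hn1 : ¬ ((((lst.drop lo).take (hi - lo)).length : Int) = 1) := by
        rw [hseglen]; omega
      have hn2 : ((((lst.drop lo).take (hi - lo)).length : Int)) / 2 = (m : Int) := by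
        rw [hseglen]; omega
      have hpy : PySem.List.pyGet? ((lst.drop lo).take (hi - lo))
          ((((lst.drop lo).take (hi - lo)).length : Int) / 2) = some (lst[lo + m]'hidx) := by
        rw [hn2, PySem.List.pyGet?_natCast, List.getElem?_eq_getElem (by omega), hget]
      have hleft : PySem.List.slice ((lst.drop lo).take (hi - lo)) none
          (some ((((lst.drop lo).take (hi - lo)).length : Int) / 2))
          = (lst.drop lo).take ((lo + m) - lo) := by
        rw [hn2, PySem.List.slice_to_natCast, List.take_take]
        congr 1; omega
      have hright : PySem.List.slice ((lst.drop lo).take (hi - lo))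
          (some ((((lst.drop lo).take (hi - lo)).length : Int) / 2 + 1)) none
          = (lst.drop (lo + m + 1)).take (hi - (lo + m + 1)) := by
        have hc : ((((lst.drop lo).take (hi - lo)).length : Int)) / 2 + 1 = ((m + 1 : Nat) : Int) := by
          rw [hn2]; push_cast; ring
        rw [hc, PySem.List.slice_from_natCast, List.drop_take, List.drop_drop]
        congr 1; omega
      rw [pv_goA_succ_some (f + 1) _ _ hn1 hpy, hleft, hright, hn2, pv_loop_succ,
        if_pos (show hi - lo > 1 by omega), hm, hgetD]
      rw [pv_safe_succ, if_neg h0, if_neg h1, hm, hgetD] at hsafe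
      by_cases hgt : lst[lo + m]'hidx > (m : Int)
      · simp only [if_pos hgt] at hsafe ⊢
        exact ih lo (lo + m) (by omega) (by omega) hsafe
      · simp only [if_neg hgt] at hsafe ⊢
        by_cases hlt : lst[lo + m]'hidx < (m : Int)
        · simp only [if_pos hlt] at hsafe ⊢
          exact ih (lo + m + 1) hi (by omega) (by omega) hsafe
        · simp only [if_neg hlt] at hsafe ⊢

-- ===== VERDICT (by name: the statement is the Claim_ definition above) =====
theorem sorted_pair_search_spec : Claim_equal_sorted_pair_search := by
  intro lst _hdom hpre
  show sorted_pair_search lst = sorted_pair_search_alt lst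
  unfold sorted_pair_search sorted_pair_search_alt
  have := pv_main lst lst.length 0 lst.length (le_refl _) (by omega) hpre
  simpa using this
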